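-- pv_equiv track=rewrite | github.com/raeez/chiral-bar-cobar | compute/lib/tautological_genus2_numerical_engine.py | _half_edge_channels
-- ===== SOURCE A (Python) =====
-- from typing import Any, Callable, Dict, List, Optional, Tuple
--
-- GENUS2_GRAPHS = [
--     {'name': 'smooth',    'vg': (2,),  'edges': [],
--      'aut': 1,  'codim': 0},
--     {'name': 'fig_eight', 'vg': (1,),  'edges': [('self', 0)],
--      'aut': 2,  'codim': 1},
--     {'name': 'banana',    'vg': (0,),  'edges': [('self', 0), ('self', 0)],
--      'aut': 8,  'codim': 2},
--     {'name': 'dumbbell',  'vg': (1, 1), 'edges': [('bridge', 0, 1)],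
--      'aut': 2,  'codim': 1},
--     {'name': 'theta',     'vg': (0, 0), 'edges': [('bridge', 0, 1)] * 3,
--      'aut': 12, 'codim': 2},
--     {'name': 'lollipop',  'vg': (0, 1), 'edges': [('self', 0), ('bridge', 0, 1)],
--      'aut': 2,  'codim': 1},
--     {'name': 'barbell',   'vg': (0, 0), 'edges': [('self', 0), ('self', 1), ('bridge', 0, 1)],
--      'aut': 8,  'codim': 2},
-- ]
--
-- def _half_edge_channels(graph_idx: int, sigma: Tuple[str, ...]) -> List[List[str]]:
--     """For each vertex, list the half-edge channels."""
--     G = GENUS2_GRAPHS[graph_idx]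
--     nv = len(G['vg'])
--     ch_at_v: List[List[str]] = [[] for _ in range(nv)]
--     for ei, edge in enumerate(G['edges']):
--         ch = sigma[ei]
--         if edge[0] == 'self':
--             v = edge[1]
--             ch_at_v[v].extend([ch, ch])
--         elif edge[0] == 'bridge':
--             ch_at_v[edge[1]].append(ch)
--             ch_at_v[edge[2]].append(ch)
--     return ch_at_v
-- ===== SOURCE B (Python) =====
-- from typing import List, Tuple
--
-- GENUS2_GRAPHS = [
--     {'name': 'smooth',    'vg': (2,),  'edges': [],
--      'aut': 1,  'codim': 0},
--     {'name': 'fig_eight', 'vg': (1,),  'edges': [('self', 0)],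
--      'aut': 2,  'codim': 1},
--     {'name': 'banana',    'vg': (0,),  'edges': [('self', 0), ('self', 0)],
--      'aut': 8,  'codim': 2},
--     {'name': 'dumbbell',  'vg': (1, 1), 'edges': [('bridge', 0, 1)],
--      'aut': 2,  'codim': 1},
--     {'name': 'theta',     'vg': (0, 0), 'edges': [('bridge', 0, 1)] * 3,
--      'aut': 12, 'codim': 2},
--     {'name': 'lollipop',  'vg': (0, 1), 'edges': [('self', 0), ('bridge', 0, 1)],
--      'aut': 2,  'codim': 1},
--     {'name': 'barbell',   'vg': (0, 0), 'edges': [('self', 0), ('self', 1), ('bridge', 0, 1)],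
--      'aut': 8,  'codim': 2},
-- ]
--
--
-- def _incident(v: int, edge) -> int:
--     """Number of half-edges of `edge` attached to vertex v."""
--     if edge[0] == 'self':
--         return 2 if edge[1] == v else 0
--     return int(edge[1] == v) + int(edge[2] == v)
--
--
-- def _half_edge_channels(graph_idx: int, sigma: Tuple[str, ...]) -> List[List[str]]:
--     """For each vertex, list the half-edge channels (per-vertex edge scan)."""
--     G = GENUS2_GRAPHS[graph_idx]
--     return [[ch
--              for ei, e in enumerate(G['edges'])
--              for ch in [sigma[ei]] * _incident(v, e)]
--             for v in range(len(G['vg']))]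
-- ===== Notes on version B (the rewrite author's own statement) =====
-- stated objective: alternative
-- what changed: B inverts the loop nesting: instead of one pass over edges mutating per-vertex lists, each vertex's channel list is built independently by scanning the edge list and taking sigma[ei] with multiplicity equal to the edge's incidence at that vertex.
import Mathlib
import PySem

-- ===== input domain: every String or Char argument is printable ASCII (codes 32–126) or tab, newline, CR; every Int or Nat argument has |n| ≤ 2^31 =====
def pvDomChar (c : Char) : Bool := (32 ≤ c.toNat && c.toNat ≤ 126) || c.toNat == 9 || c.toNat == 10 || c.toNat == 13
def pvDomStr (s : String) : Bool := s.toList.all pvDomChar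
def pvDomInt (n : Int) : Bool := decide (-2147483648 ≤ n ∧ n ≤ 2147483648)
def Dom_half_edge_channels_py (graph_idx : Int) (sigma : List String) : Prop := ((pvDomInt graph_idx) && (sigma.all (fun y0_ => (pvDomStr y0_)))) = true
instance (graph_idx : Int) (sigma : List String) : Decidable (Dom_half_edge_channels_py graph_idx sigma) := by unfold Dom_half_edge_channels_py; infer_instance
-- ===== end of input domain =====

-- B inverts the loop nesting (per-vertex edge scans instead of one edge pass mutating
-- per-vertex lists); alternative decomposition, same results.


-- ===== PORT A =====
inductive PyEdge
  | selfE : Int → PyEdge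
  | bridgeE : Int → Int → PyEdge
deriving DecidableEq, Repr

-- the module constant GENUS2_GRAPHS, keeping only the fields the function reads ('vg', 'edges')
def genus2Graphs : List (List Int × List PyEdge) :=
  [ ([2], []),
    ([1], [.selfE 0]),
    ([0], [.selfE 0, .selfE 0]),
    ([1, 1], [.bridgeE 0 1]),
    ([0, 0], [.bridgeE 0 1, .bridgeE 0 1, .bridgeE 0 1]),
    ([0, 1], [.selfE 0, .bridgeE 0 1]),
    ([0, 0], [.selfE 0, .selfE 1, .bridgeE 0 1]) ]

def half_edge_channels_py (graph_idx : Int) (sigma : List String) : List (List String) :=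
  match PySem.List.pyGet? genus2Graphs graph_idx with
  | none => []   -- IndexError: excluded by Pre_
  | some G =>
    let nv := G.1.length
    let init : List (List String) := (List.range nv).map (fun _ => [])
    (PySem.List.enumerate G.2).foldl (fun ch_at_v p =>
      let ch := PySem.List.pyGetD sigma p.1 ""   -- sigma[ei]; in range under Pre_
      match p.2 with
      | .selfE v =>
          PySem.List.pySetD ch_at_v v ((PySem.List.pyGetD ch_at_v v []) ++ [ch, ch])
      | .bridgeE a b =>
          let t := PySem.List.pySetD ch_at_v a ((PySem.List.pyGetD ch_at_v a []) ++ [ch])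
          PySem.List.pySetD t b ((PySem.List.pyGetD t b []) ++ [ch])) init

-- ===== PORT B =====
def incidentB (v : Int) (e : PyEdge) : Nat :=
  match e with
  | .selfE w => if w = v then 2 else 0
  | .bridgeE a b => (if a = v then 1 else 0) + (if b = v then 1 else 0)

def half_edge_channels_py_alt (graph_idx : Int) (sigma : List String) : List (List String) :=
  match PySem.List.pyGet? genus2Graphs graph_idx with
  | none => []   -- IndexError: excluded by Pre_
  | some G =>
    (List.range G.1.length).map (fun v =>
      (PySem.List.enumerate G.2).flatMap (fun p =>
        List.replicate (incidentB (v : Int) p.2) (PySem.List.pyGetD sigma p.1 "")))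

-- ===== PRECONDITION & SPEC =====
-- Pre_ excludes exactly the inputs where A raises IndexError: a graph index outside the
-- 7-entry table (Python negative indexing included) or a sigma shorter than the edge list.
def Pre_half_edge_channels_py (graph_idx : Int) (sigma : List String) : Prop :=
  -7 ≤ graph_idx ∧ graph_idx < 7 ∧
  PySem.List.pyGetD ([0, 1, 2, 1, 3, 2, 3] : List Nat) graph_idx 0 ≤ sigma.length
instance (graph_idx : Int) (sigma : List String) : Decidable (Pre_half_edge_channels_py graph_idx sigma) := by unfold Pre_half_edge_channels_py; infer_instance

def pvWitness_half_edge_channels_py : Int × List String := (6, ["a", "b", "c"])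

def Spec_half_edge_channels_py (graph_idx : Int) (sigma : List String) (out : List (List String)) : Prop := out = half_edge_channels_py_alt graph_idx sigma
instance (graph_idx : Int) (sigma : List String) (out : List (List String)) : Decidable (Spec_half_edge_channels_py graph_idx sigma out) := by unfold Spec_half_edge_channels_py; infer_instance

-- ===== CLAIM (what is proved, stated in full; the proofs are below) =====
def Claim_equal_half_edge_channels_py : Prop := ∀ (graph_idx : Int) (sigma : List String), Dom_half_edge_channels_py graph_idx sigma → Pre_half_edge_channels_py graph_idx sigma → Spec_half_edge_channels_py graph_idx sigma (half_edge_channels_py graph_idx sigma)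

-- ===== LEMMAS AND PROOFS =====

-- ===== VERDICT (by name: the statement is the Claim_ definition above) =====
theorem half_edge_channels_py_spec : Claim_equal_half_edge_channels_py := by
  intro graph_idx sigma _ hpre
  obtain ⟨h1, h2, -⟩ := hpre
  unfold Spec_half_edge_channels_py
  interval_cases graph_idx <;> rfl
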